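-- pv_equiv track=rewrite | github.com/RunCatRun/sum-between-max-min | sum_negatives.py | sum_negatives_between_max_min
-- ===== SOURCE A (Python) =====
-- def sum_negatives_between_max_min(arr):
--     """
--     Возвращает сумму отрицательных элементов между первыми вхождениями
--     максимального и минимального элементов массива.
--     """
--
--     if len(arr) < 3:
--         return 0, "not_enough_elements"
--
--     value_min = min(arr)
--     value_max = max(arr)
--
--     index_min = arr.index(value_min)
--     index_max = arr.index(value_max)
--
--     # Новый случай: максимум и минимум рядом
--     if abs(index_min - index_max) == 1:
--         return 0, "max_min_adjacent"
--
--     start_pos = min(index_min, index_max) + 1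
--     end_pos = max(index_min, index_max)
--
--     if start_pos >= end_pos:
--         return 0, "no_elements"
--
--     interval_slice = arr[start_pos:end_pos]
--     negatives_in_slice = [num for num in interval_slice if num < 0]
--
--     if not negatives_in_slice:
--         return 0, "no_negatives"
--
--     negative_sum = sum(negatives_in_slice)
--     return negative_sum, None
-- ===== SOURCE B (Python) =====
-- def sum_negatives_between_max_min(arr):
--     if len(arr) < 3:
--         return 0, "not_enough_elements"
--
--     # argmin/argmax over enumerated pairs: one key-based extremum call each,
--     # no separate value search followed by .index rescans
--     pairs = list(enumerate(arr))
--     index_min = min(pairs, key=lambda p: p[1])[0]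
--     index_max = max(pairs, key=lambda p: p[1])[0]
--
--     if abs(index_min - index_max) == 1:
--         return 0, "max_min_adjacent"
--
--     start_pos = min(index_min, index_max) + 1
--     end_pos = max(index_min, index_max)
--     if start_pos >= end_pos:
--         return 0, "no_elements"
--
--     # prefix tables: neg_sum[k] / neg_cnt[k] aggregate the negatives of arr[:k];
--     # the interval answer is then an O(1) difference of table entries
--     neg_sum = [0]
--     neg_cnt = [0]
--     s = c = 0
--     for x in arr:
--         if x < 0:
--             s += x
--             c += 1
--         neg_sum.append(s)
--         neg_cnt.append(c)
--
--     if neg_cnt[end_pos] == neg_cnt[start_pos]: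
--         return 0, "no_negatives"
--     return neg_sum[end_pos] - neg_sum[start_pos], None
-- ===== Notes on version B (the rewrite author's own statement) =====
-- stated objective: alternative
-- what changed: A finds the extreme values with min()/max() and then rescans with arr.index() twice and sums a filtered slice; B instead takes key-based argmin/argmax over enumerated (index,value) pairs and precomputes prefix-sum and prefix-count tables of the negatives, answering the interval query as an O(1) difference of two table entries.
import Mathlib
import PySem

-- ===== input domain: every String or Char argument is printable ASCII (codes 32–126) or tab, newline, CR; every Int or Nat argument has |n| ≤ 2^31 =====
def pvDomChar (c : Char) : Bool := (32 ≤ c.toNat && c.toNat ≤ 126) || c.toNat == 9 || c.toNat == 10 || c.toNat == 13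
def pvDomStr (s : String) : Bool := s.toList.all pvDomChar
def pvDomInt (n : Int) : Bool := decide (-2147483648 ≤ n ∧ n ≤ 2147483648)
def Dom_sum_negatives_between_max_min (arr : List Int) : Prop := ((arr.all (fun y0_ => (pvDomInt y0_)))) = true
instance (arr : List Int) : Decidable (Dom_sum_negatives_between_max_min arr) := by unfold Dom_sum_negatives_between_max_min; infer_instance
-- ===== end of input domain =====

-- B replaces A's min/max-then-index rescans by key-based argmin/argmax over enumerated pairs
-- and the slice+filter sum by prefix-sum/count tables of negatives (objective: alternative).


-- ===== PORT A =====
def sum_negatives_between_max_min (arr : List Int) : Int × Option String :=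
  if arr.length < 3 then (0, some "not_enough_elements") else
  match PySem.List.min? arr (fun y => y), PySem.List.max? arr (fun y => y) with
  | some value_min, some value_max =>
    -- arr is nonempty here, so min/max exist and arr.index finds them; getD 0 is unreachable
    let index_min : Int := ((PySem.List.index? arr value_min).getD 0 : Nat)
    let index_max : Int := ((PySem.List.index? arr value_max).getD 0 : Nat)
    if (index_min - index_max).natAbs = 1 then (0, some "max_min_adjacent") else
    let start_pos := min index_min index_max + 1
    let end_pos := max index_min index_max
    if start_pos ≥ end_pos then (0, some "no_elements") else
    let interval_slice := PySem.List.slice arr (some start_pos) (some end_pos)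
    let negatives_in_slice := interval_slice.filter (fun num => decide (num < 0))
    if negatives_in_slice.isEmpty then (0, some "no_negatives") else
    (negatives_in_slice.sum, none)
  | _, _ => (0, none)   -- unreachable: arr ≠ [] since 3 ≤ len

-- ===== PORT B =====
def sum_negatives_between_max_min_alt (arr : List Int) : Int × Option String :=
  if arr.length < 3 then (0, some "not_enough_elements") else
  let pairs := PySem.List.enumerate arr 0
  -- arr is nonempty here, so the key-based min/max over pairs exist
  match PySem.List.min? pairs (fun p => p.2) with
  | none => (0, none)   -- unreachable: pairs ≠ [] since 3 ≤ len
  | some pmin =>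
  match PySem.List.max? pairs (fun p => p.2) with
  | none => (0, none)   -- unreachable: pairs ≠ [] since 3 ≤ len
  | some pmax =>
    let index_min := pmin.1
    let index_max := pmax.1
    if (index_min - index_max).natAbs = 1 then (0, some "max_min_adjacent") else
    let start_pos := min index_min index_max + 1
    let end_pos := max index_min index_max
    if start_pos ≥ end_pos then (0, some "no_elements") else
    -- one pass building the prefix tables neg_sum / neg_cnt (state: tables, running s, c)
    let tabs := arr.foldl
      (fun (st : List Int × List Int × Int × Int) x =>
        let s := if x < 0 then st.2.2.1 + x else st.2.2.1
        let c := if x < 0 then st.2.2.2 + 1 else st.2.2.2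
        (st.1 ++ [s], st.2.1 ++ [c], s, c))
      ([0], [0], 0, 0)
    let neg_sum := tabs.1
    let neg_cnt := tabs.2.1
    -- table indices are in range (0 ≤ start_pos < end_pos ≤ len), so pyGetD's default is unreachable
    if PySem.List.pyGetD neg_cnt end_pos 0 = PySem.List.pyGetD neg_cnt start_pos 0
    then (0, some "no_negatives")
    else (PySem.List.pyGetD neg_sum end_pos 0 - PySem.List.pyGetD neg_sum start_pos 0, none)

-- ===== PRECONDITION & SPEC =====
def Spec_sum_negatives_between_max_min (arr : List Int) (out : Int × Option String) : Prop := out = sum_negatives_between_max_min_alt arr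
instance (arr : List Int) (out : Int × Option String) : Decidable (Spec_sum_negatives_between_max_min arr out) := by unfold Spec_sum_negatives_between_max_min; infer_instance

-- ===== CLAIM (what is proved, stated in full; the proofs are below) =====
def Claim_equal_sum_negatives_between_max_min : Prop := ∀ (arr : List Int), Dom_sum_negatives_between_max_min arr → Spec_sum_negatives_between_max_min arr (sum_negatives_between_max_min arr)

-- ===== LEMMAS AND PROOFS =====

theorem pv_idxOf?_mem (as : List Int) (m : Int) (h : m ∈ as) : as.idxOf? m = some (as.idxOf m) := by
  induction as with
  | nil => simp at h
  | cons x t ih =>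
    by_cases hx : x = m
    · subst hx; simp [List.idxOf?_cons]
    · rcases List.mem_cons.mp h with h1 | h1
      · exact absurd h1.symm hx
      · simp [List.idxOf?_cons, hx, ih h1, beq_iff_eq]

-- A's index of the first occurrence of the minimum, as an if on the running minimum
theorem pv_index_min (a : Int) (as : List Int) :
    (((PySem.List.index? (a :: as) (as.foldl min a)).getD 0 : Nat) : Int)
    = if as.foldl min a < a then 1 + (as.idxOf (as.foldl min a) : Int) else 0 := by
  have hm := (PySem.List.foldl_min_le as a).1
  by_cases h : as.foldl min a < a
  · have hne : a ≠ as.foldl min a := by omega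
    have hmem : as.foldl min a ∈ as := by
      rcases PySem.List.foldl_min_mem as a with h1 | h1
      · omega
      · exact h1
    rw [if_pos h, PySem.List.index?_cons_of_ne as hne, PySem.List.index?_eq_idxOf?,
        pv_idxOf?_mem as _ hmem]
    simp; ring
  · have heq : as.foldl min a = a := le_antisymm hm (not_lt.mp h)
    rw [if_neg h, heq, PySem.List.index?_cons_self]
    simp

theorem pv_index_max (a : Int) (as : List Int) :
    (((PySem.List.index? (a :: as) (as.foldl max a)).getD 0 : Nat) : Int)
    = if a < as.foldl max a then 1 + (as.idxOf (as.foldl max a) : Int) else 0 := by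
  have hm := (PySem.List.le_foldl_max as a).1
  by_cases h : a < as.foldl max a
  · have hne : a ≠ as.foldl max a := by omega
    have hmem : as.foldl max a ∈ as := by
      rcases PySem.List.foldl_max_mem as a with h1 | h1
      · omega
      · exact h1
    rw [if_pos h, PySem.List.index?_cons_of_ne as hne, PySem.List.index?_eq_idxOf?,
        pv_idxOf?_mem as _ hmem]
    simp; ring
  · have heq : as.foldl max a = a := le_antisymm (not_lt.mp h) hm
    rw [if_neg h, heq, PySem.List.index?_cons_self]
    simp

-- one step of B's key-based min/max over pairs absorbs the second element into the head
theorem pv_min?_step (p q : Int × Int) (rest : List (Int × Int)) :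
    PySem.List.min? (p :: q :: rest) (fun r => r.2)
    = PySem.List.min? ((if q.2 < p.2 then q else p) :: rest) (fun r => r.2) := by
  by_cases h : q.2 < p.2 <;> simp [PySem.List.min?, List.foldl_cons, h]

theorem pv_max?_step (p q : Int × Int) (rest : List (Int × Int)) :
    PySem.List.max? (p :: q :: rest) (fun r => r.2)
    = PySem.List.max? ((if p.2 < q.2 then q else p) :: rest) (fun r => r.2) := by
  by_cases h : p.2 < q.2 <;> simp [PySem.List.max?, List.foldl_cons, h]

-- B's key-based min over enumerated pairs keeps the FIRST pair with the minimal value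
theorem pv_min?_enum (as : List Int) (s i0 v0 : Int) :
    PySem.List.min? ((i0, v0) :: PySem.List.enumerate as s) (fun p => p.2)
    = some (if as.foldl min v0 < v0
            then (s + (as.idxOf (as.foldl min v0) : Int), as.foldl min v0)
            else (i0, v0)) := by
  induction as generalizing s i0 v0 with
  | nil => simp [PySem.List.min?, PySem.List.enumerate_nil]
  | cons x t ih =>
    rw [PySem.List.enumerate_cons, pv_min?_step]
    simp only [List.foldl_cons]
    by_cases hx : x < v0
    · simp only [if_pos hx]
      rw [ih]
      have hm := (PySem.List.foldl_min_le t x).1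
      rw [min_eq_right hx.le]
      by_cases hlt : t.foldl min x < x
      · have hne : x ≠ t.foldl min x := by omega
        rw [if_pos (by omega : t.foldl min x < v0), List.idxOf_cons_ne _ hne]
        simp only [if_pos hlt]
        push_cast; ring_nf
      · have heq : t.foldl min x = x := le_antisymm hm (not_lt.mp hlt)
        rw [if_neg hlt, if_pos (by omega : t.foldl min x < v0), heq, List.idxOf_cons_self]
        simp
    · simp only [if_neg hx]
      rw [ih, min_eq_left (not_lt.mp hx)]
      by_cases hlt : t.foldl min v0 < v0
      · have hne : x ≠ t.foldl min v0 := by omega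
        rw [if_pos hlt, if_pos hlt, List.idxOf_cons_ne _ hne]
        push_cast; ring_nf
      · rw [if_neg hlt, if_neg hlt]

theorem pv_max?_enum (as : List Int) (s i0 v0 : Int) :
    PySem.List.max? ((i0, v0) :: PySem.List.enumerate as s) (fun p => p.2)
    = some (if v0 < as.foldl max v0
            then (s + (as.idxOf (as.foldl max v0) : Int), as.foldl max v0)
            else (i0, v0)) := by
  induction as generalizing s i0 v0 with
  | nil => simp [PySem.List.max?, PySem.List.enumerate_nil]
  | cons x t ih =>
    rw [PySem.List.enumerate_cons, pv_max?_step]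
    simp only [List.foldl_cons]
    by_cases hx : v0 < x
    · simp only [if_pos hx]
      rw [ih, max_eq_right hx.le]
      have hm := (PySem.List.le_foldl_max t x).1
      by_cases hlt : x < t.foldl max x
      · have hne : x ≠ t.foldl max x := by omega
        rw [if_pos (by omega : v0 < t.foldl max x), List.idxOf_cons_ne _ hne]
        simp only [if_pos hlt]
        push_cast; ring_nf
      · have heq : t.foldl max x = x := le_antisymm (not_lt.mp hlt) hm
        rw [if_neg hlt, if_pos (by omega : v0 < t.foldl max x), heq, List.idxOf_cons_self]
        simp
    · simp only [if_neg hx]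
      rw [ih, max_eq_left (not_lt.mp hx)]
      by_cases hlt : v0 < t.foldl max v0
      · have hne : x ≠ t.foldl max v0 := by omega
        rw [if_pos hlt, if_pos hlt, List.idxOf_cons_ne _ hne]
        push_cast; ring_nf
      · rw [if_neg hlt, if_neg hlt]

-- the negatives of a prefix: sum and count
def pvNegSum (l : List Int) : Int := (l.filter (fun n => decide (n < 0))).sum
def pvNegCnt (l : List Int) : Int := ((l.filter (fun n => decide (n < 0))).length : Int)

theorem pvNegSum_append (u v : List Int) : pvNegSum (u ++ v) = pvNegSum u + pvNegSum v := by
  simp [pvNegSum]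

theorem pvNegCnt_append (u v : List Int) : pvNegCnt (u ++ v) = pvNegCnt u + pvNegCnt v := by
  simp only [pvNegCnt, List.filter_append, List.length_append]
  push_cast
  ring

-- shifting a prefix map across a cons
theorem pv_shift (g : List Int → Int) (hg : ∀ u v, g (u ++ v) = g u + g v)
    (x : Int) (t : List Int) (s : Int) :
    ((s + g [x]) :: (List.range t.length).map (fun k => s + g [x] + g (t.take (k + 1))))
    = (List.range (t.length + 1)).map (fun k => s + g ((x :: t).take (k + 1))) := by
  rw [List.range_succ_eq_map, List.map_cons, List.map_map]
  refine List.cons_eq_cons.mpr ⟨?_, ?_⟩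
  · simp [List.take_succ_cons]
  · apply List.map_congr_left
    intro k _
    simp only [Function.comp_apply, Nat.succ_eq_add_one, List.take_succ_cons]
    rw [show x :: List.take (k + 1) t = [x] ++ List.take (k + 1) t from rfl, hg]
    ring

-- B's table-building fold, characterised
theorem pv_tabs (xs : List Int) (acc1 acc2 : List Int) (s c : Int) :
    xs.foldl
      (fun (st : List Int × List Int × Int × Int) x =>
        let s := if x < 0 then st.2.2.1 + x else st.2.2.1
        let c := if x < 0 then st.2.2.2 + 1 else st.2.2.2
        (st.1 ++ [s], st.2.1 ++ [c], s, c))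
      (acc1, acc2, s, c)
    = (acc1 ++ (List.range xs.length).map (fun k => s + pvNegSum (xs.take (k + 1))),
       acc2 ++ (List.range xs.length).map (fun k => c + pvNegCnt (xs.take (k + 1))),
       s + pvNegSum xs, c + pvNegCnt xs) := by
  induction xs generalizing acc1 acc2 s c with
  | nil => simp [pvNegSum, pvNegCnt]
  | cons x t ih =>
    simp only [List.foldl_cons]
    rw [ih]
    have hs : (if x < 0 then s + x else s) = s + pvNegSum [x] := by
      by_cases h : x < 0 <;> simp [pvNegSum, h]
    have hc : (if x < 0 then c + 1 else c) = c + pvNegCnt [x] := by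
      by_cases h : x < 0 <;> simp [pvNegCnt, h]
    rw [hs, hc]
    simp only [Prod.mk.injEq]
    refine ⟨?_, ?_, ?_, ?_⟩
    · rw [List.append_assoc, List.singleton_append, List.length_cons]
      exact congrArg (acc1 ++ ·) (pv_shift pvNegSum pvNegSum_append x t s)
    · rw [List.append_assoc, List.singleton_append, List.length_cons]
      exact congrArg (acc2 ++ ·) (pv_shift pvNegCnt pvNegCnt_append x t c)
    · rw [show x :: t = [x] ++ t from rfl, pvNegSum_append]; ring
    · rw [show x :: t = [x] ++ t from rfl, pvNegCnt_append]; ring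

-- the full table is the prefix map over range (n+1)
theorem pv_table_shape (f : List Int → Int) (hf : f [] = 0) (xs : List Int) :
    ([(0 : Int)] ++ (List.range xs.length).map (fun k => 0 + f (xs.take (k + 1))))
    = (List.range (xs.length + 1)).map (fun k => f (xs.take k)) := by
  rw [List.range_succ_eq_map, List.map_cons, List.map_map]
  simp only [List.take_zero, hf, List.singleton_append]
  congr 1
  apply List.map_congr_left
  intro k _
  simp

-- reading a table entry at an in-range Int index
theorem pv_get_table (f : List Int → Int) (xs : List Int) (i : Int)
    (h0 : 0 ≤ i) (hl : i ≤ (xs.length : Int)) :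
    PySem.List.pyGetD ((List.range (xs.length + 1)).map (fun k => f (xs.take k))) i 0
    = f (xs.take i.toNat) := by
  rw [PySem.List.pyGetD_eq_getElem _ 0 h0 (by simp; omega)]
  rw [List.getElem_map, List.getElem_range]

-- prefix difference = aggregate over the slice
theorem pv_prefix_diff (xs : List Int) (a b : Int) (h0 : 0 ≤ a) (hab : a ≤ b)
    (_hb : b ≤ (xs.length : Int)) (f : List Int → Int) (hf : ∀ u v, f (u ++ v) = f u + f v) :
    f (xs.take b.toNat) - f (xs.take a.toNat)
    = f (PySem.List.slice xs (some a) (some b)) := by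
  have hsplit : xs.take b.toNat = xs.take a.toNat ++ (xs.drop a.toNat).take (b.toNat - a.toNat) := by
    have hkey : b.toNat = a.toNat + (b.toNat - a.toNat) := by omega
    conv_lhs => rw [hkey]
    exact List.take_add ..
  rw [PySem.List.slice_toNat xs h0 (by omega), hsplit, hf]
  ring

-- ===== VERDICT (by name: the statement is the Claim_ definition above) =====
theorem sum_negatives_between_max_min_spec : Claim_equal_sum_negatives_between_max_min := by
  intro arr _
  unfold Spec_sum_negatives_between_max_min
  by_cases h3 : arr.length < 3
  · simp [sum_negatives_between_max_min, sum_negatives_between_max_min_alt, h3]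
  · match arr with
    | [] => simp at h3
    | a :: as =>
      simp only [sum_negatives_between_max_min, sum_negatives_between_max_min_alt, if_neg h3,
        PySem.List.min?_id_cons, PySem.List.max?_id_cons, PySem.List.enumerate_cons]
      rw [pv_min?_enum as (0 + 1) 0 a, pv_max?_enum as (0 + 1) 0 a]
      simp only [zero_add]
      rw [pv_index_min, pv_index_max]
      set I : Int := (if List.foldl min a as < a then 1 + (List.idxOf (List.foldl min a as) as : Int) else 0) with hI
      set J : Int := (if a < List.foldl max a as then 1 + (List.idxOf (List.foldl max a as) as : Int) else 0) with hJ
      have hBmin : (if List.foldl min a as < a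
          then ((1 : Int) + (List.idxOf (List.foldl min a as) as : Int), List.foldl min a as)
          else ((0 : Int), a)).1 = I := by
        rw [hI]; split_ifs <;> rfl
      have hBmax : (if a < List.foldl max a as
          then ((1 : Int) + (List.idxOf (List.foldl max a as) as : Int), List.foldl max a as)
          else ((0 : Int), a)).1 = J := by
        rw [hJ]; split_ifs <;> rfl
      rw [hBmin, hBmax]
      have hlen : 3 ≤ (a :: as).length := not_lt.mp h3
      have hIb : 0 ≤ I ∧ I < ((a :: as).length : Int) := by
        rw [hI]; split_ifs with h
        · have hmem : List.foldl min a as ∈ as := by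
            rcases PySem.List.foldl_min_mem as a with h1 | h1
            · omega
            · exact h1
          have := List.idxOf_lt_length_of_mem hmem
          constructor
          · positivity
          · simp only [List.length_cons]; push_cast; omega
        · constructor
          · omega
          · simp only [List.length_cons]; push_cast; omega
      have hJb : 0 ≤ J ∧ J < ((a :: as).length : Int) := by
        rw [hJ]; split_ifs with h
        · have hmem : List.foldl max a as ∈ as := by
            rcases PySem.List.foldl_max_mem as a with h1 | h1
            · omega
            · exact h1
          have := List.idxOf_lt_length_of_mem hmem
          constructor
          · positivity
          · simp only [List.length_cons]; push_cast; omega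
        · constructor
          · omega
          · simp only [List.length_cons]; push_cast; omega
      by_cases hadj : (I - J).natAbs = 1
      · simp only [if_pos hadj]
      · simp only [if_neg hadj]
        by_cases hse : min I J + 1 ≥ max I J
        · simp only [if_pos hse]
        · simp only [if_neg hse]
          -- B side: evaluate the prefix tables at start_pos / end_pos
          rw [pv_tabs (a :: as) [0] [0] 0 0]
          rw [pv_table_shape pvNegSum rfl (a :: as), pv_table_shape pvNegCnt rfl (a :: as)]
          have hS : 0 ≤ min I J + 1 := by omega
          have hSle : min I J + 1 ≤ ((a :: as).length : Int) := by omega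
          have hE : 0 ≤ max I J := by omega
          have hEle : max I J ≤ ((a :: as).length : Int) := by omega
          rw [pv_get_table pvNegCnt (a :: as) (max I J) hE hEle,
              pv_get_table pvNegCnt (a :: as) (min I J + 1) hS hSle,
              pv_get_table pvNegSum (a :: as) (max I J) hE hEle,
              pv_get_table pvNegSum (a :: as) (min I J + 1) hS hSle]
          have hdiffS := pv_prefix_diff (a :: as) (min I J + 1) (max I J) hS (by omega) hEle
              pvNegSum pvNegSum_append
          have hdiffC := pv_prefix_diff (a :: as) (min I J + 1) (max I J) hS (by omega) hEle
              pvNegCnt pvNegCnt_append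
          have hcnt0 : (pvNegCnt ((a :: as).take (max I J).toNat)
              = pvNegCnt ((a :: as).take (min I J + 1).toNat))
              ↔ ((PySem.List.slice (a :: as) (some (min I J + 1)) (some (max I J))).filter
                  (fun num => decide (num < 0))).isEmpty := by
            constructor
            · intro h
              have h0 : pvNegCnt (PySem.List.slice (a :: as) (some (min I J + 1)) (some (max I J))) = 0 := by
                omega
              simp only [pvNegCnt] at h0
              rw [List.isEmpty_iff, ← List.length_eq_zero_iff]
              omega
            · intro h
              rw [List.isEmpty_iff] at h
              have h0 : pvNegCnt (PySem.List.slice (a :: as) (some (min I J + 1)) (some (max I J))) = 0 := by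
                simp [pvNegCnt, h]
              omega
          by_cases hE0 : ((PySem.List.slice (a :: as) (some (min I J + 1)) (some (max I J))).filter
              (fun num => decide (num < 0))).isEmpty
          · rw [if_pos hE0, if_pos (hcnt0.mpr hE0)]
          · rw [if_neg hE0, if_neg (fun h => hE0 (hcnt0.mp h))]
            rw [hdiffS]
            rfl
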